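-- pv_equiv track=rewrite | github.com/perrymanuk/radbot | radbot/filesystem/tools.py | _preserve_indentation
-- ===== SOURCE A (Python) =====
-- def _preserve_indentation(original_line: str, new_text: str) -> str:
--     """
--     Preserve indentation from original line in new text.
--
--     Args:
--         original_line: The original line with indentation
--         new_text: The new text to indent
--
--     Returns:
--         Indented new text
--     """
--     # Determine leading whitespace
--     leading_whitespace = ""
--     for char in original_line:
--         if char in (" ", "\t"):
--             leading_whitespace += char
--         else:
--             break
--
--     # Apply indentation to each line
--     lines = new_text.split("\n")
--     for i in range(1, len(lines)):
--         lines[i] = leading_whitespace + lines[i]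
--
--     return "\n".join(lines)
-- ===== SOURCE B (Python) =====
-- def _preserve_indentation(original_line: str, new_text: str) -> str:
--     """Preserve indentation from original line in new text."""
--     k = len(original_line) - len(original_line.lstrip(" \t"))
--     lead = original_line[:k]
--     return "".join(c + lead if c == "\n" else c for c in new_text)
-- ===== Notes on version B (the rewrite author's own statement) =====
-- stated objective: alternative
-- what changed: A splits new_text into a list of lines, mutates indices 1..n to prepend the accumulated leading whitespace, and rejoins; B never builds lines at all: it measures the indentation width arithmetically via len(line)-len(line.lstrip(' \t')) and streams over the characters of new_text once, expanding each '\n' into '\n'+lead inside a single join of a generator.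
import Mathlib
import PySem

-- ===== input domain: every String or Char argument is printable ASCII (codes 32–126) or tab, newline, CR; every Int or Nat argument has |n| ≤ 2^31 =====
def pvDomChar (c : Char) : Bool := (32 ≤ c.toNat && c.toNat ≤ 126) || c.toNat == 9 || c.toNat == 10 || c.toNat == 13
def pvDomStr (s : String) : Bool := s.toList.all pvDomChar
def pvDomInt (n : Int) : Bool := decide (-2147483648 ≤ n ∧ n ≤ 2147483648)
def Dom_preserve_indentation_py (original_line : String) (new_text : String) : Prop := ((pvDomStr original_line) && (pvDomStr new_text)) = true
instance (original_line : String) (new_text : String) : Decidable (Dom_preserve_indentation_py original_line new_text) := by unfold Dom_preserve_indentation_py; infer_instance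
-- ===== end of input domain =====

-- B never builds a list of lines: it measures the indentation width arithmetically via
-- len - len(lstrip(" \t")) and streams over new_text once, expanding '\n' to '\n'+lead
-- inside one join of a generator; return values proved equal everywhere.

-- ===== PORT A =====
-- the 'for char in original_line: … break' loop accumulating leading whitespace
def pvLeadLoop : List Char → List Char
  | [] => []
  | c :: cs => if c = ' ' ∨ c = '\t' then c :: pvLeadLoop cs else []

-- 'for i in range(1, len(lines)): lines[i] = leading + lines[i]' — prefix every line after the first
def pvPrefixTail (leading : List Char) : List (List Char) → List (List Char)
  | [] => []
  | l0 :: rest => l0 :: rest.map (fun l => leading ++ l)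

def preserve_indentation_py (original_line : String) (new_text : String) : String :=
  let leading := pvLeadLoop original_line.toList
  let lines := PySem.Chars.splitOn new_text.toList ['\n']
  String.ofList (PySem.Chars.join ['\n'] (pvPrefixTail leading lines))

-- ===== PORT B =====
def preserve_indentation_py_alt (original_line : String) (new_text : String) : String :=
  -- len(original_line) - len(original_line.lstrip(" \t")): lstrip with an explicit char set is
  -- exactly dropWhile on the listed characters
  let k := original_line.toList.length -
           (original_line.toList.dropWhile (fun c => c = ' ' ∨ c = '\t')).length
  let lead := original_line.toList.take k   -- original_line[:k], 0 ≤ k ≤ len: exact slice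
  -- ''.join(c + lead if c == '\n' else c for c in new_text)
  String.ofList (new_text.toList.flatMap (fun c => if c = '\n' then c :: lead else [c]))

-- ===== PRECONDITION & SPEC =====
def Spec_preserve_indentation_py (original_line : String) (new_text : String) (out : String) : Prop := out = preserve_indentation_py_alt original_line new_text
instance (original_line : String) (new_text : String) (out : String) : Decidable (Spec_preserve_indentation_py original_line new_text out) := by unfold Spec_preserve_indentation_py; infer_instance

-- ===== CLAIM (what is proved, stated in full; the proofs are below) =====
def Claim_equal_preserve_indentation_py : Prop := ∀ (original_line : String) (new_text : String), Dom_preserve_indentation_py original_line new_text → Spec_preserve_indentation_py original_line new_text (preserve_indentation_py original_line new_text)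

-- ===== LEMMAS AND PROOFS =====

-- A's char loop and B's arithmetic slice compute the same leading-whitespace prefix
theorem pvLeadLoop_eq_take (cs : List Char) :
    pvLeadLoop cs = cs.take (cs.length - (cs.dropWhile (fun c => c = ' ' ∨ c = '\t')).length) := by
  induction cs with
  | nil => rfl
  | cons c t ih =>
    by_cases h : c = ' ' ∨ c = '\t'
    · have hle : (List.dropWhile (fun c => decide (c = ' ' ∨ c = '\t')) t).length ≤ t.length :=
        List.length_dropWhile_le _ t
      simp only [pvLeadLoop, if_pos h, List.dropWhile_cons, decide_eq_true h, if_true, List.length_cons]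
      rw [ih, show t.length + 1 - (List.dropWhile (fun c => decide (c = ' ' ∨ c = '\t')) t).length
            = (t.length - (List.dropWhile (fun c => decide (c = ' ' ∨ c = '\t')) t).length) + 1 from by omega,
          List.take_succ_cons]
    · simp [pvLeadLoop, h]

-- per-character effect of the whole transformation
def pvF (L : List Char) (c : Char) : List Char := if c = '\n' then '\n' :: L else [c]

-- reference splitter on '\n'
def pvSplit : List Char → List (List Char)
  | [] => [[]]
  | c :: t => if c = '\n' then [] :: pvSplit t else (pvSplit t).modifyHead (c :: ·)

theorem pvSplit_ne_nil (cs : List Char) : pvSplit cs ≠ [] := by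
  induction cs with
  | nil => simp [pvSplit]
  | cons c t ih =>
    by_cases h : c = '\n' <;> simp [pvSplit, h]
    cases hs : pvSplit t with
    | nil => exact absurd hs ih
    | cons h0 r => simp

theorem nl_isPrefixOf (c : Char) (t : List Char) : (['\n'] : List Char).isPrefixOf (c :: t) = ('\n' == c) := by
  show ('\n' == c && List.isPrefixOf [] t) = _
  simp [List.isPrefixOf]

theorem splitOn_go_char : ∀ (fuel : Nat) (cs cur : List Char) (acc : List (List Char)), cs.length ≤ fuel →
    PySem.Chars.splitOn.go ['\n'] fuel cs cur acc = acc.reverse ++ (pvSplit cs).modifyHead (cur.reverse ++ ·) := by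
  intro fuel
  induction fuel with
  | zero => intro cs cur acc h; simp at h; simp [h, PySem.Chars.splitOn.go, pvSplit]
  | succ n ih =>
    intro cs cur acc h
    cases cs with
    | nil => simp [PySem.Chars.splitOn.go, pvSplit]
    | cons c t =>
      simp only [PySem.Chars.splitOn.go]
      by_cases hc : c = '\n'
      · subst hc
        rw [if_pos (by simp)]
        rw [ih _ _ _ (by simpa using Nat.le_of_succ_le_succ h)]
        simp only [pvSplit, List.reverse_cons, List.append_assoc]
        congr 1
        cases hs : pvSplit t with
        | nil => exact absurd hs (pvSplit_ne_nil t)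
        | cons h0 r => simp [hs, List.modifyHead]
      · rw [if_neg (by simp [nl_isPrefixOf, Ne.symm hc])]
        rw [ih _ _ _ (by simpa using Nat.le_of_succ_le_succ h)]
        simp only [pvSplit, if_neg hc]
        congr 1
        cases hs : pvSplit t with
        | nil => exact absurd hs (pvSplit_ne_nil t)
        | cons h0 r => simp [List.modifyHead]

theorem splitOn_char (cs : List Char) : PySem.Chars.splitOn cs ['\n'] = pvSplit cs := by
  rw [PySem.Chars.splitOn, splitOn_go_char _ _ _ _ (by omega)]
  cases hs : pvSplit cs with
  | nil => exact absurd hs (pvSplit_ne_nil cs)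
  | cons h0 r => simp [List.modifyHead]

theorem join_modifyHead (L : List Char) (a : List Char) (r : List (List Char)) :
    PySem.Chars.join ['\n'] ((L ++ a) :: r) = L ++ PySem.Chars.join ['\n'] (a :: r) := by
  cases r with
  | nil => simp [PySem.Chars.join_singleton]
  | cons b r => simp [PySem.Chars.join_cons_cons]

-- A's join-of-prefixed-lines equals the character-wise flatMap that B computes
theorem join_pvSplit (L : List Char) (cs : List Char) :
    PySem.Chars.join ['\n'] (pvPrefixTail L (pvSplit cs)) = cs.flatMap (pvF L) := by
  induction cs with
  | nil => simp [pvSplit, pvPrefixTail, PySem.Chars.join_singleton]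
  | cons c t ih =>
    cases hs : pvSplit t with
    | nil => exact absurd hs (pvSplit_ne_nil t)
    | cons h0 r =>
      rw [hs] at ih
      simp only [pvPrefixTail] at ih
      by_cases hc : c = '\n'
      · subst hc
        rw [show pvSplit ('\n' :: t) = [] :: pvSplit t from by simp [pvSplit], hs]
        simp only [pvPrefixTail, List.map_cons]
        rw [PySem.Chars.join_cons_cons, join_modifyHead, ih]
        simp [pvF]
      · rw [show pvSplit (c :: t) = (pvSplit t).modifyHead (c :: ·) from by simp [pvSplit, hc], hs]
        simp only [List.modifyHead, pvPrefixTail]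
        have h2 : PySem.Chars.join ['\n'] ((c :: h0) :: r.map (fun l => L ++ l))
            = c :: PySem.Chars.join ['\n'] (h0 :: r.map (fun l => L ++ l)) := by
          simpa using join_modifyHead [c] h0 (r.map (fun l => L ++ l))
        rw [h2, ih]
        simp [pvF, hc]

-- ===== VERDICT (by name: the statement is the Claim_ definition above) =====
theorem preserve_indentation_py_spec : Claim_equal_preserve_indentation_py := by
  intro o n _
  unfold Spec_preserve_indentation_py preserve_indentation_py preserve_indentation_py_alt
  simp only [splitOn_char, join_pvSplit, ← pvLeadLoop_eq_take]
  rw [show pvF (pvLeadLoop o.toList) = fun c => if c = '\n' then c :: pvLeadLoop o.toList else [c]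
      from funext fun c => by
        rw [pvF]; split_ifs with h
        · rw [h]
        · rfl]
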